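-- pv_equiv track=rewrite | github.com/therapymatch-collab/theravoca-mvp | backend/scripts/import_therapists_xlsx.py | map_availability
-- ===== SOURCE A (Python) =====
-- AVAILABILITY_MAP = {
--     "Mornings": ["weekday_morning"],
--     "Afternoons": ["weekday_afternoon"],
--     "Evenings": ["weekday_evening"],
--     "Weekends": ["weekend_morning", "weekend_afternoon"],
-- }
--
-- def map_availability(values: list[str]) -> list[str]:
--     out: list[str] = []
--     seen: set[str] = set()
--     for v in values:
--         for slug in AVAILABILITY_MAP.get(v, []):
--             if slug not in seen:
--                 out.append(slug)
--                 seen.add(slug)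
--     return out
-- ===== SOURCE B (Python) =====
-- AVAILABILITY_MAP = {
--     "Mornings": ["weekday_morning"],
--     "Afternoons": ["weekday_afternoon"],
--     "Evenings": ["weekday_evening"],
--     "Weekends": ["weekend_morning", "weekend_afternoon"],
-- }
--
-- def map_availability(values: list[str]) -> list[str]:
--     # Deduplicate the *labels* first (first occurrence wins), then expand.
--     # Correct because the slug lists of distinct labels are pairwise disjoint
--     # and each is duplicate-free, so dedup at the label level equals A's
--     # dedup at the slug level.
--     unique_labels = list(dict.fromkeys(values))
--     return [slug for v in unique_labels for slug in AVAILABILITY_MAP.get(v, [])]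
-- ===== Notes on version B (the rewrite author's own statement) =====
-- stated objective: alternative
-- what changed: Moves deduplication from the slug level to the label level: B dedups the input labels first and then expands each unique label once, exploiting that the map's slug lists are pairwise disjoint and duplicate-free, instead of A's per-slug seen-set filtering during expansion.
import Mathlib
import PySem

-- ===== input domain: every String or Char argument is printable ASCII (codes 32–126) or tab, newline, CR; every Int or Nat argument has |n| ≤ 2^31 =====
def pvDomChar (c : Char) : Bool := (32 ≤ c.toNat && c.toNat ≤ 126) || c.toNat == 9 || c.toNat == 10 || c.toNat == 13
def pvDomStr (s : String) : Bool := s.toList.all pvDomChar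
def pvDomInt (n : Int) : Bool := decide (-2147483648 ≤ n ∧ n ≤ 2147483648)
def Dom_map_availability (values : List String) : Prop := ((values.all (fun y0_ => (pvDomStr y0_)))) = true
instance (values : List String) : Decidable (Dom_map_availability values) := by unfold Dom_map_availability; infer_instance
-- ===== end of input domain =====

-- B dedups the labels first and then expands each unique label once (the map's slug lists are pairwise disjoint and duplicate-free), instead of A's per-slug seen-set filtering; same cost, a different algorithm.


-- ===== PORT A =====
-- module constant AVAILABILITY_MAP (shared context of both programs)
def availabilityMap : PySem.Dict String (List String) :=
  PySem.Dict.ofList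
    [ ("Mornings", ["weekday_morning"])
    , ("Afternoons", ["weekday_afternoon"])
    , ("Evenings", ["weekday_evening"])
    , ("Weekends", ["weekend_morning", "weekend_afternoon"]) ]

def map_availability (values : List String) : List String :=
  (values.foldl
    (fun (st : List String × PySem.Set String) v =>
      (PySem.Dict.getD availabilityMap v []).foldl
        (fun st slug =>
          if PySem.Set.contains st.2 slug then st
          else (st.1 ++ [slug], PySem.Set.add st.2 slug)) st)
    ([], PySem.Set.empty)).1

-- ===== PORT B =====
def map_availability_alt (values : List String) : List String :=
  (PySem.List.dedup values).flatMap (fun v => PySem.Dict.getD availabilityMap v [])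

-- ===== PRECONDITION & SPEC =====
def Spec_map_availability (values : List String) (out : List String) : Prop := out = map_availability_alt values
instance (values : List String) (out : List String) : Decidable (Spec_map_availability values out) := by unfold Spec_map_availability; infer_instance

-- ===== CLAIM (what is proved, stated in full; the proofs are below) =====
def Claim_equal_map_availability : Prop := ∀ (values : List String), Dom_map_availability values → Spec_map_availability values (map_availability values)

-- ===== LEMMAS AND PROOFS =====
-- characterisation of the map lookup
theorem pv_getD (v : String) : PySem.Dict.getD availabilityMap v [] =
    if v = "Weekends" then ["weekend_morning", "weekend_afternoon"]
    else if v = "Evenings" then ["weekday_evening"]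
    else if v = "Afternoons" then ["weekday_afternoon"]
    else if v = "Mornings" then ["weekday_morning"]
    else [] := by
  simp [availabilityMap, PySem.Dict.ofList, PySem.Dict.update, PySem.Dict.getD_insert,
    PySem.Dict.getD_empty, List.foldl]

theorem pv_mem_f (v x : String) :
    x ∈ PySem.Dict.getD availabilityMap v [] ↔
      (v = "Mornings" ∧ x = "weekday_morning") ∨
      (v = "Afternoons" ∧ x = "weekday_afternoon") ∨
      (v = "Evenings" ∧ x = "weekday_evening") ∨
      (v = "Weekends" ∧ (x = "weekend_morning" ∨ x = "weekend_afternoon")) := by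
  rw [pv_getD]; split_ifs with h1 h2 h3 h4 <;> simp_all

-- distinct labels yield disjoint slug lists
theorem pv_f_inj (a b x : String)
    (ha : x ∈ PySem.Dict.getD availabilityMap a [])
    (hb : x ∈ PySem.Dict.getD availabilityMap b []) : a = b := by
  rw [pv_mem_f] at ha hb
  rcases ha with ⟨h,h'⟩|⟨h,h'⟩|⟨h,h'⟩|⟨h,h'⟩ <;>
    rcases hb with ⟨g,g'⟩|⟨g,g'⟩|⟨g,g'⟩|⟨g,g'⟩ <;> subst_vars <;> simp_all

-- every slug list is duplicate-free
theorem pv_f_nodup (v : String) : (PySem.Dict.getD availabilityMap v []).Nodup := by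
  rw [pv_getD]; split_ifs <;> simp

-- A's inner loop, started with out = seen, keeps them equal and acts as folding Set.add
theorem pv_inner_eq (l : List String) (s : PySem.Set String) :
    l.foldl
      (fun (st : List String × PySem.Set String) slug =>
        if PySem.Set.contains st.2 slug then st
        else (st.1 ++ [slug], PySem.Set.add st.2 slug)) (s, s)
    = (l.foldl PySem.Set.add s, l.foldl PySem.Set.add s) := by
  induction l generalizing s with
  | nil => rfl
  | cons x xs ih =>
    simp only [List.foldl_cons]
    by_cases h : PySem.Set.contains s x
    · have hadd : PySem.Set.add s x = s := by simp [PySem.Set.add]; simpa using h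
      rw [if_pos h, hadd, ih s]
    · have hadd : PySem.Set.add s x = s ++ [x] := by simp [PySem.Set.add]; simpa using h
      rw [if_neg h, hadd, ih (s ++ [x])]

-- A's outer loop equals folding Set.add over the flattened slug list
theorem pv_outer_eq (values : List String) (s : PySem.Set String) :
    values.foldl
      (fun (st : List String × PySem.Set String) v =>
        (PySem.Dict.getD availabilityMap v []).foldl
          (fun st slug =>
            if PySem.Set.contains st.2 slug then st
            else (st.1 ++ [slug], PySem.Set.add st.2 slug)) st) (s, s)
    = ((values.flatMap (fun v => PySem.Dict.getD availabilityMap v [])).foldl PySem.Set.add s,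
       (values.flatMap (fun v => PySem.Dict.getD availabilityMap v [])).foldl PySem.Set.add s) := by
  induction values generalizing s with
  | nil => rfl
  | cons v vs ih =>
    simp only [List.foldl_cons, List.flatMap_cons, List.foldl_append, pv_inner_eq, ih]

-- folding Set.add over elements already present changes nothing
theorem pv_fold_mem (l s : List String) (h : ∀ y ∈ l, y ∈ s) :
    l.foldl PySem.Set.add s = s := by
  induction l generalizing s with
  | nil => rfl
  | cons x xs ih =>
    have hx : PySem.Set.add s x = s := by
      have hm : x ∈ s := h x (by simp)
      simp [PySem.Set.add, PySem.Set.contains, hm]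
    simp only [List.foldl_cons, hx]
    exact ih s (fun y hy => h y (by simp [hy]))

-- folding Set.add over fresh, duplicate-free elements appends them all
theorem pv_fold_fresh (l s : List String) (hn : l.Nodup) (h : ∀ y ∈ l, y ∉ s) :
    l.foldl PySem.Set.add s = s ++ l := by
  induction l generalizing s with
  | nil => simp
  | cons x xs ih =>
    have hx : PySem.Set.add s x = s ++ [x] := by
      simp [PySem.Set.add, PySem.Set.contains]
      exact h x (by simp)
    simp only [List.foldl_cons, hx]
    rw [ih (s ++ [x]) hn.of_cons]
    · simp
    · intro y hy
      simp only [List.mem_append, List.mem_singleton]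
      rintro (hs | rfl)
      · exact h y (by simp [hy]) hs
      · exact (List.nodup_cons.mp hn).1 hy

-- dedup commutes with flatMap for this disjoint, duplicate-free map
theorem pv_dedup_comm (xs ds : List String) (hnd : ds.Nodup) :
    (xs.flatMap (fun v => PySem.Dict.getD availabilityMap v [])).foldl PySem.Set.add
        (ds.flatMap (fun v => PySem.Dict.getD availabilityMap v []))
    = (xs.foldl PySem.Set.add ds).flatMap (fun v => PySem.Dict.getD availabilityMap v []) := by
  induction xs generalizing ds with
  | nil => rfl
  | cons x xs ih =>
    simp only [List.flatMap_cons, List.foldl_append, List.foldl_cons]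
    by_cases hx : x ∈ ds
    · have h1 : (PySem.Dict.getD availabilityMap x []).foldl PySem.Set.add
          (ds.flatMap (fun v => PySem.Dict.getD availabilityMap v []))
          = ds.flatMap (fun v => PySem.Dict.getD availabilityMap v []) :=
        pv_fold_mem _ _ (fun y hy => List.mem_flatMap.mpr ⟨x, hx, hy⟩)
      have h2 : PySem.Set.add ds x = ds := by
        simp [PySem.Set.add, PySem.Set.contains, hx]
      rw [h1, h2, ih ds hnd]
    · have h1 : (PySem.Dict.getD availabilityMap x []).foldl PySem.Set.add
          (ds.flatMap (fun v => PySem.Dict.getD availabilityMap v []))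
          = (ds ++ [x]).flatMap (fun v => PySem.Dict.getD availabilityMap v []) := by
        rw [pv_fold_fresh _ _ (pv_f_nodup x)]
        · simp
        · intro y hy hmem
          obtain ⟨d, hd, hyd⟩ := List.mem_flatMap.mp hmem
          exact hx (pv_f_inj x d y hy hyd ▸ hd)
      have h2 : PySem.Set.add ds x = ds ++ [x] := by
        simp [PySem.Set.add, PySem.Set.contains, hx]
      rw [h1, h2, ih (ds ++ [x])
        (hnd.append (List.nodup_singleton x)
          (by simpa [List.disjoint_singleton] using hx))]

-- ===== VERDICT (by name: the statement is the Claim_ definition above) =====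
theorem map_availability_spec : Claim_equal_map_availability := by
  intro values _
  unfold Spec_map_availability map_availability map_availability_alt
  rw [show (PySem.Set.empty : PySem.Set String) = [] from rfl]
  rw [pv_outer_eq values []]
  have := pv_dedup_comm values [] List.nodup_nil
  simp only [List.flatMap_nil] at this
  rw [this]
  simp [PySem.List.dedup_eq_ofList, PySem.Set.ofList_eq_foldl]
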